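-- pv_equiv track=rewrite | github.com/HuyaneMatsu/hata | hata/ext/management/commands/addbot.py | prepare_bot_name
-- ===== SOURCE A (Python) =====
-- CONVERT_TO_UNDERSCORE = frozenset((
--     '\t', '\n', '\r', ' ', '!', '"', '#', '$', '%', '&', '\'', '(', ')', '*', '+', ',', '-', '.', '/', ':', ';', '<',
--     '=', '>', '?', '@', '[', '\\', ']', '^', '_', '`', '{', '|', '}', '~', '}',
-- ))
--
-- UNDERSCORE = '_'
--
-- def prepare_bot_name(bot_name):
--     """
--     Prepares bot name.
--
--     Parameters
--     ----------
--     bot_name : `str`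
--         The bot name to prepare.
--
--     Returns
--     -------
--     bot_name : `str`
--     """
--     is_last_underscore = True
--     new_name_characters = []
--
--     for character in bot_name:
--         if character in CONVERT_TO_UNDERSCORE:
--             if not is_last_underscore:
--                 is_last_underscore = True
--                 new_name_characters.append(UNDERSCORE)
--         else:
--             new_name_characters.append(character)
--             is_last_underscore = False
--
--     if is_last_underscore:
--         while True:
--             if not new_name_characters:
--                 break
--
--             del new_name_characters[-1]
--
--             if new_name_characters[-1] == UNDERSCORE:
--                 continue
--
--             break
--
--     return ''.join(new_name_characters)
-- ===== SOURCE B (Python) =====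
-- CONVERT_TO_UNDERSCORE = frozenset((
--     '\t', '\n', '\r', ' ', '!', '"', '#', '$', '%', '&', '\'', '(', ')', '*', '+', ',', '-', '.', '/', ':', ';', '<',
--     '=', '>', '?', '@', '[', '\\', ']', '^', '_', '`', '{', '|', '}', '~', '}',
-- ))
--
--
-- def prepare_bot_name(bot_name):
--     parts = []
--     current = []
--     for character in bot_name:
--         if character in CONVERT_TO_UNDERSCORE:
--             if current:
--                 parts.append(''.join(current))
--                 current = []
--         else:
--             current.append(character)
--     if current:
--         parts.append(''.join(current))
--     return '_'.join(parts)
-- ===== Notes on version B (the rewrite author's own statement) =====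
-- stated objective: simpler
-- what changed: B splits the name into maximal runs of non-separator characters and joins the non-empty tokens with single underscores, instead of A's character-by-character emission with an is_last_underscore flag plus a trailing-underscore trim loop.
import Mathlib
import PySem

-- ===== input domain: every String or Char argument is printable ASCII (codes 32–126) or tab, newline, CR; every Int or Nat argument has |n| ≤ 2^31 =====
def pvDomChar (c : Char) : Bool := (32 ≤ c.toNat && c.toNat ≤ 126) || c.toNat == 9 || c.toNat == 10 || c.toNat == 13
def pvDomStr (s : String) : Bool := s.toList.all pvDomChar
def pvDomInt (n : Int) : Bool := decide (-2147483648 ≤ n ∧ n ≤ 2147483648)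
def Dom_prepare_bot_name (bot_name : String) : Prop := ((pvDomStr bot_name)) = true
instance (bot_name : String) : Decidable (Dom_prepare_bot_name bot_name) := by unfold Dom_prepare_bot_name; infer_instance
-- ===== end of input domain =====

-- B replaces A's flag-and-trim character emission by splitting into non-separator tokens and
-- joining the non-empty tokens with '_' (objective: simpler).

-- ===== PORT A =====
-- CONVERT_TO_UNDERSCORE (frozenset membership, ported as list membership)
def pvSepChars : List Char :=
  ['\t', '\n', '\r', ' ', '!', '"', '#', '$', '%', '&', '\'', '(', ')', '*', '+', ',', '-', '.', '/',
   ':', ';', '<', '=', '>', '?', '@', '[', '\\', ']', '^', '_', '`', '{', '|', '}', '~']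

def pvIsSep (c : Char) : Bool := pvSepChars.contains c

-- the main for-loop of A: state (is_last_underscore, new_name_characters)
def prepare_bot_name_loopA : List Char → Bool → List Char → Bool × List Char
  | [], isLast, acc => (isLast, acc)
  | c :: rest, isLast, acc =>
    if pvIsSep c then
      if isLast then prepare_bot_name_loopA rest isLast acc
      else prepare_bot_name_loopA rest true (acc ++ ['_'])
    else prepare_bot_name_loopA rest false (acc ++ [c])

-- A's trailing 'while True' trim loop; `new_name_characters[-1]` after the `del` is ported as
-- getLast? (the `some '_'` test); the IndexError case (empty after del) is unreachable from A's loop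
def prepare_bot_name_trim (l : List Char) : List Char :=
  if _hnil : l = [] then l
  else
    let l' := l.dropLast
    if l'.getLast? = some '_' then prepare_bot_name_trim l'
    else l'
termination_by l.length
decreasing_by
  simp only [List.length_dropLast]
  cases l with
  | nil => exact absurd rfl _hnil
  | cons a t => simp

def prepare_bot_name (bot_name : String) : String :=
  let st := prepare_bot_name_loopA bot_name.toList true []
  if st.1 then String.ofList (prepare_bot_name_trim st.2) else String.ofList st.2

-- ===== PORT B =====
-- B's loop: accumulate the current token, flush non-empty tokens into `parts`
def prepare_bot_name_loopB : List Char → List Char → List (List Char) → List (List Char)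
  | [], current, parts => if current = [] then parts else parts ++ [current]
  | c :: rest, current, parts =>
    if pvIsSep c then
      if current = [] then prepare_bot_name_loopB rest [] parts
      else prepare_bot_name_loopB rest [] (parts ++ [current])
    else prepare_bot_name_loopB rest (current ++ [c]) parts

def prepare_bot_name_alt (bot_name : String) : String :=
  String.ofList (List.intercalate ['_'] (prepare_bot_name_loopB bot_name.toList [] []))

-- ===== PRECONDITION & SPEC =====
def Spec_prepare_bot_name (bot_name : String) (out : String) : Prop := out = prepare_bot_name_alt bot_name
instance (bot_name : String) (out : String) : Decidable (Spec_prepare_bot_name bot_name out) := by unfold Spec_prepare_bot_name; infer_instance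

-- ===== CLAIM (what is proved, stated in full; the proofs are below) =====
def Claim_equal_prepare_bot_name : Prop := ∀ (bot_name : String), Dom_prepare_bot_name bot_name → Spec_prepare_bot_name bot_name (prepare_bot_name bot_name)

-- ===== LEMMAS AND PROOFS =====

-- the buffer A has built, expressed from B's state
def pvAccOf (parts : List (List Char)) (current : List Char) : List Char :=
  if current = [] then
    (if parts = [] then [] else List.intercalate ['_'] parts ++ ['_'])
  else List.intercalate ['_'] (parts ++ [current])

-- A's post-loop phase, as one function of the loop result
def pvFinishA (st : Bool × List Char) : List Char :=
  if st.1 then prepare_bot_name_trim st.2 else st.2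

def pvGood (parts : List (List Char)) : Prop :=
  ∀ t ∈ parts, t ≠ [] ∧ t.getLast? ≠ some '_'

theorem intercalate_cons₂ (s a b : List Char) (r : List (List Char)) :
    List.intercalate s (a :: b :: r) = a ++ s ++ List.intercalate s (b :: r) := by
  simp [List.intercalate, List.intersperse]

theorem intercalate_concat (s : List Char) (parts : List (List Char)) (x : List Char) :
    List.intercalate s (parts ++ [x]) =
      (if parts = [] then x else List.intercalate s parts ++ s ++ x) := by
  induction parts with
  | nil => simp [List.intercalate]
  | cons a q ih =>
    cases q with
    | nil => simp [List.intercalate]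
    | cons b r =>
      simp only [List.cons_append, intercalate_cons₂]
      rw [show b :: (r ++ [x]) = (b :: r) ++ [x] from rfl, ih]
      simp

theorem getLast?_intercalate (parts : List (List Char)) (hne : parts ≠ [])
    (hg : pvGood parts) :
    (List.intercalate ['_'] parts).getLast? ≠ some '_' := by
  obtain ⟨q, t, rfl⟩ := List.eq_nil_or_concat parts |>.resolve_left hne
  have ht := hg t (by simp)
  rw [List.concat_eq_append, intercalate_concat]
  split
  · exact ht.2
  · rw [List.getLast?_append_of_ne_nil _ ht.1]
    exact ht.2

theorem trim_spec (parts : List (List Char)) (hg : pvGood parts) :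
    prepare_bot_name_trim (pvAccOf parts []) = List.intercalate ['_'] parts := by
  by_cases hp : parts = []
  · subst hp
    simp [pvAccOf, prepare_bot_name_trim, List.intercalate]
  · have hacc : pvAccOf parts [] = List.intercalate ['_'] parts ++ ['_'] := by
      simp [pvAccOf, hp]
    rw [hacc, prepare_bot_name_trim]
    have h1 : List.intercalate ['_'] parts ++ ['_'] ≠ ([] : List Char) := by simp
    rw [dif_neg h1]
    simp only [List.dropLast_concat]
    rw [if_neg (getLast?_intercalate parts hp hg)]

theorem loop_equiv (cs : List Char) (current : List Char) (parts : List (List Char))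
    (hg : pvGood parts) (hc : current.getLast? ≠ some '_') :
    pvFinishA (prepare_bot_name_loopA cs current.isEmpty (pvAccOf parts current)) =
      List.intercalate ['_'] (prepare_bot_name_loopB cs current parts) := by
  induction cs generalizing current parts with
  | nil =>
    by_cases hcur : current = []
    · subst hcur
      simp only [prepare_bot_name_loopA, prepare_bot_name_loopB, List.isEmpty_nil]
      exact trim_spec parts hg
    · have hEmp : current.isEmpty = false := by simp [hcur]
      simp [prepare_bot_name_loopA, prepare_bot_name_loopB, hEmp, hcur, pvFinishA, pvAccOf]
  | cons c rest ih =>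
    by_cases hsep : pvIsSep c = true
    · by_cases hcur : current = []
      · subst hcur
        simp only [prepare_bot_name_loopA, prepare_bot_name_loopB, List.isEmpty_nil, hsep, if_true]
        exact ih [] parts hg (by simp)
      · have hEmp : current.isEmpty = false := by simp [hcur]
        simp only [prepare_bot_name_loopA, prepare_bot_name_loopB, hEmp, hsep, if_true,
          Bool.false_eq_true, if_false, if_neg hcur]
        have hacc : pvAccOf parts current ++ ['_'] = pvAccOf (parts ++ [current]) [] := by
          simp [pvAccOf, hcur]
        rw [hacc]
        have hg' : pvGood (parts ++ [current]) := by
          intro t ht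
          rcases List.mem_append.mp ht with h | h
          · exact hg t h
          · simp only [List.mem_singleton] at h
            subst h
            exact ⟨hcur, hc⟩
        exact ih [] (parts ++ [current]) hg' (by simp)
    · have hc' : c ≠ '_' := by
        intro h; subst h
        simp [pvIsSep, pvSepChars] at hsep
      have hsep' : pvIsSep c = false := by simp [hsep]
      simp only [prepare_bot_name_loopA, prepare_bot_name_loopB, hsep', Bool.false_eq_true,
        if_false]
      have hacc : pvAccOf parts current ++ [c] = pvAccOf parts (current ++ [c]) := by
        by_cases hcur : current = []
        · subst hcur
          have h2 : pvAccOf parts ([] ++ [c]) = List.intercalate ['_'] (parts ++ [[c]]) := by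
            simp [pvAccOf]
          rw [h2, intercalate_concat]
          by_cases hp : parts = [] <;> simp [pvAccOf, hp, List.intercalate]
        · have h1 : current ++ [c] ≠ ([] : List Char) := by simp
          rw [pvAccOf, pvAccOf, if_neg hcur, if_neg h1,
            intercalate_concat, intercalate_concat]
          split <;> simp
      have hEmp : (current ++ [c]).isEmpty = false := by simp
      rw [hacc, ← hEmp]
      exact ih (current ++ [c]) parts hg (by simp [hc'])

-- ===== VERDICT (by name: the statement is the Claim_ definition above) =====
theorem prepare_bot_name_spec : Claim_equal_prepare_bot_name := by
  intro bot_name _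
  unfold Spec_prepare_bot_name prepare_bot_name_alt
  have h := loop_equiv bot_name.toList [] [] (by intro t ht; simp at ht) (by simp)
  simp only [List.isEmpty_nil] at h
  have hacc : pvAccOf ([] : List (List Char)) [] = [] := rfl
  rw [hacc] at h
  rcases hA : prepare_bot_name_loopA bot_name.toList true [] with ⟨b, acc⟩
  rw [hA] at h
  cases b <;> simp [pvFinishA] at h <;> simp [prepare_bot_name, hA, h]
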